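-- pv_equiv track=rewrite | github.com/DqkrLord0Xerod/YGO-Database-Project | yugioh_db_generator/core/formatter.py | _generate_rulings
-- ===== SOURCE A (Python) =====
-- from typing import Dict, List, Any, Optional
--
-- def _generate_rulings(card_name: str, card_text: str, property_val: str) -> List[str]:
--     """Generate appropriate rulings based on card text analysis."""
--     rulings = []
--
--     # Skip for empty text
--     if not card_text:
--         return ["Always verify card rulings with the official rulebook or a tournament judge."]
--
--     # Look for once per turn effects
--     if "once per turn" in card_text.lower():
--         rulings.append(f"The \"once per turn\" effect(s) of {card_name} reset if the card leaves the field and returns.")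
--
--     # Look for targeting effects
--     if "target" in card_text.lower():
--         rulings.append(f"Effects that prevent targeting will prevent {card_name} from selecting those cards as targets.")
--
--     # Look for destruction effects
--     if "destroy" in card_text.lower():
--         rulings.append(f"Cards with destruction protection cannot be destroyed by {card_name}'s effect.")
--
--     # Look for optional effects
--     if any(x in card_text.lower() for x in ["you can", "you may"]):
--         rulings.append(f"The effect of {card_name} that states \"you can\" is optional and can be activated at the player's discretion.")
--
--     # Look for negation effects
--     if "negate" in card_text.lower():
--         rulings.append(f"When {card_name} negates an effect, it only negates the effect and not the activation, unless otherwise specified.")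
--
--     # Look for summoning conditions
--     if "cannot be normal summoned/set" in card_text.lower():
--         rulings.append(f"{card_name} must be Special Summoned by its own procedure and cannot be Special Summoned by other effects unless specified.")
--
--     # Look for common archetypes in the text
--     archetypes = ["Snake-eye", "Snake-Eyes", "Crystal Beast", "Fiendsmith", "Allure Queen", "World Legacy", "World Chalice"]
--     for archetype in archetypes:
--         if archetype.lower() in card_text.lower():
--             rulings.append(f"This card specifically supports the \"{archetype}\" archetype and works well with other \"{archetype}\" cards.")
--             break
--
--     # Add property-specific rulings
--     if property_val == "Quick-Play":
--         rulings.append("This Quick-Play Spell can be activated from the hand during your opponent's turn if it was set on your field in a previous turn.")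
--     elif property_val == "Counter":
--         rulings.append("This Counter Trap can be chained to the activation of other effects at Spell Speed 3.")
--     elif property_val == "Link":
--         rulings.append("The Link Arrows on this card determine which zones it points to for card effects that reference linked zones.")
--     elif property_val == "Pendulum":
--         rulings.append("When this card is destroyed while in a Monster Zone, you can place it in your Pendulum Zone instead of sending it to the GY.")
--
--     # If we couldn't generate any specific rulings, add generic ones
--     if not rulings:
--         rulings.append(f"Always verify the timing and activation conditions of {card_name} with the current official rulebook.")
--         rulings.append(f"For tournament play, consult with a judge for specific interactions involving {card_name}.")
--
--     return rulings
-- ===== SOURCE B (Python) =====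
-- from typing import Dict, List, Any, Optional
--
--
-- def _generate_rulings(card_name: str, card_text: str, property_val: str) -> List[str]:
--     """Generate rulings via ONE left-to-right scan of the lowered text that
--     collects every matched keyword id, then emits the messages from that set."""
--     if not card_text:
--         return ["Always verify card rulings with the official rulebook or a tournament judge."]
--
--     low = card_text.lower()
--
--     # (id, lowered keyword) pairs; 'opt' groups the two optional-effect phrasings,
--     # archetype ids keep the original capitalisation for the message.
--     patterns = [
--         ("once per turn", "once per turn"),
--         ("target", "target"),
--         ("destroy", "destroy"),
--         ("opt", "you can"),
--         ("opt", "you may"),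
--         ("negate", "negate"),
--         ("cannot be normal summoned/set", "cannot be normal summoned/set"),
--         ("Snake-eye", "snake-eye"),
--         ("Snake-Eyes", "snake-eyes"),
--         ("Crystal Beast", "crystal beast"),
--         ("Fiendsmith", "fiendsmith"),
--         ("Allure Queen", "allure queen"),
--         ("World Legacy", "world legacy"),
--         ("World Chalice", "world chalice"),
--     ]
--
--     # single pass over the text: at each position record which patterns start there
--     found = set()
--     for i in range(len(low)):
--         for pid, kw in patterns:
--             if pid not in found and low.startswith(kw, i):
--                 found.add(pid)
--
--     core = [
--         ("once per turn",
--          f"The \"once per turn\" effect(s) of {card_name} reset if the card leaves the field and returns."),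
--         ("target",
--          f"Effects that prevent targeting will prevent {card_name} from selecting those cards as targets."),
--         ("destroy",
--          f"Cards with destruction protection cannot be destroyed by {card_name}'s effect."),
--         ("opt",
--          f"The effect of {card_name} that states \"you can\" is optional and can be activated at the player's discretion."),
--         ("negate",
--          f"When {card_name} negates an effect, it only negates the effect and not the activation, unless otherwise specified."),
--         ("cannot be normal summoned/set",
--          f"{card_name} must be Special Summoned by its own procedure and cannot be Special Summoned by other effects unless specified."),
--     ]
--     rulings = [msg for pid, msg in core if pid in found]
--
--     archetypes = ["Snake-eye", "Snake-Eyes", "Crystal Beast", "Fiendsmith",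
--                   "Allure Queen", "World Legacy", "World Chalice"]
--     hit = next((a for a in archetypes if a in found), None)
--     if hit is not None:
--         rulings.append(f"This card specifically supports the \"{hit}\" archetype and works well with other \"{hit}\" cards.")
--
--     property_messages = {
--         "Quick-Play": "This Quick-Play Spell can be activated from the hand during your opponent's turn if it was set on your field in a previous turn.",
--         "Counter": "This Counter Trap can be chained to the activation of other effects at Spell Speed 3.",
--         "Link": "The Link Arrows on this card determine which zones it points to for card effects that reference linked zones.",
--         "Pendulum": "When this card is destroyed while in a Monster Zone, you can place it in your Pendulum Zone instead of sending it to the GY.",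
--     }
--     prop_msg = property_messages.get(property_val)
--     if prop_msg is not None:
--         rulings.append(prop_msg)
--
--     return rulings or [
--         f"Always verify the timing and activation conditions of {card_name} with the current official rulebook.",
--         f"For tournament play, consult with a judge for specific interactions involving {card_name}.",
--     ]
-- ===== Notes on version B (the rewrite author's own statement) =====
-- stated objective: alternative
-- what changed: Replaces A's seven independent substring searches and if/elif chains by a single left-to-right scan of the lowered text that collects every matched keyword id into a set (multi-pattern matching in one pass), followed by an emission phase that reads the messages off that set (ordered table, first-hit archetype lookup, dict lookup for the property).
import Mathlib
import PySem

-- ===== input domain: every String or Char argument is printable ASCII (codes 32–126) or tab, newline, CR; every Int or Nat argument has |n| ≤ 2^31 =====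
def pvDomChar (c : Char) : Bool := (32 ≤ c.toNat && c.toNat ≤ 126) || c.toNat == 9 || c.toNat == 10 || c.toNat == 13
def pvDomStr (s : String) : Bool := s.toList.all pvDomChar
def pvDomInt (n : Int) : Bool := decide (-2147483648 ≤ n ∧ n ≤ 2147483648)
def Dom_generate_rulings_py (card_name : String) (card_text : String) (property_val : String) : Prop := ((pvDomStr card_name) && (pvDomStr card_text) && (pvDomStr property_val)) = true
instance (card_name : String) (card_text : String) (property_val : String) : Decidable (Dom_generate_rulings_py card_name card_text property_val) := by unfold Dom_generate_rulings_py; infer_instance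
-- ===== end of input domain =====

-- B replaces A's seven independent substring searches by ONE left-to-right scan of the
-- lowered text that collects all matched keyword ids into a set, then emits the messages
-- from that set; objective 'alternative' (different algorithm, similar cost).

-- ===== PORT A =====
-- shared message constants (pure string builders, used by both ports)
def pvMsgEmpty : String := "Always verify card rulings with the official rulebook or a tournament judge."
def pvMsgOnce (card_name : String) : String := "The \"once per turn\" effect(s) of " ++ card_name ++ " reset if the card leaves the field and returns."
def pvMsgTarget (card_name : String) : String := "Effects that prevent targeting will prevent " ++ card_name ++ " from selecting those cards as targets."
def pvMsgDestroy (card_name : String) : String := "Cards with destruction protection cannot be destroyed by " ++ card_name ++ "'s effect."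
def pvMsgOptional (card_name : String) : String := "The effect of " ++ card_name ++ " that states \"you can\" is optional and can be activated at the player's discretion."
def pvMsgNegate (card_name : String) : String := "When " ++ card_name ++ " negates an effect, it only negates the effect and not the activation, unless otherwise specified."
def pvMsgSummon (card_name : String) : String := card_name ++ " must be Special Summoned by its own procedure and cannot be Special Summoned by other effects unless specified."
def pvMsgArch (a : String) : String := "This card specifically supports the \"" ++ a ++ "\" archetype and works well with other \"" ++ a ++ "\" cards."
def pvMsgQP : String := "This Quick-Play Spell can be activated from the hand during your opponent's turn if it was set on your field in a previous turn."
def pvMsgCounter : String := "This Counter Trap can be chained to the activation of other effects at Spell Speed 3."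
def pvMsgLink : String := "The Link Arrows on this card determine which zones it points to for card effects that reference linked zones."
def pvMsgPend : String := "When this card is destroyed while in a Monster Zone, you can place it in your Pendulum Zone instead of sending it to the GY."
def pvMsgGeneric1 (card_name : String) : String := "Always verify the timing and activation conditions of " ++ card_name ++ " with the current official rulebook."
def pvMsgGeneric2 (card_name : String) : String := "For tournament play, consult with a judge for specific interactions involving " ++ card_name ++ "."
def pvArchetypes : List String := ["Snake-eye", "Snake-Eyes", "Crystal Beast", "Fiendsmith", "Allure Queen", "World Legacy", "World Chalice"]

-- A's for-loop over archetypes with break: first matching archetype appends and stops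
def pvArchLoopA (low : String) (rulings : List String) : List String → List String
  | [] => rulings
  | a :: rest =>
      if PySem.Str.isIn (PySem.Str.lower a) low then rulings ++ [pvMsgArch a]
      else pvArchLoopA low rulings rest

def generate_rulings_py (card_name : String) (card_text : String) (property_val : String) : List String :=
  if card_text = "" then [pvMsgEmpty]
  else
    let rulings : List String := []
    let rulings := if PySem.Str.isIn "once per turn" (PySem.Str.lower card_text) then rulings ++ [pvMsgOnce card_name] else rulings
    let rulings := if PySem.Str.isIn "target" (PySem.Str.lower card_text) then rulings ++ [pvMsgTarget card_name] else rulings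
    let rulings := if PySem.Str.isIn "destroy" (PySem.Str.lower card_text) then rulings ++ [pvMsgDestroy card_name] else rulings
    let rulings := if ["you can", "you may"].any (fun x => PySem.Str.isIn x (PySem.Str.lower card_text)) then rulings ++ [pvMsgOptional card_name] else rulings
    let rulings := if PySem.Str.isIn "negate" (PySem.Str.lower card_text) then rulings ++ [pvMsgNegate card_name] else rulings
    let rulings := if PySem.Str.isIn "cannot be normal summoned/set" (PySem.Str.lower card_text) then rulings ++ [pvMsgSummon card_name] else rulings
    let rulings := pvArchLoopA (PySem.Str.lower card_text) rulings pvArchetypes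
    let rulings :=
      if property_val = "Quick-Play" then rulings ++ [pvMsgQP]
      else if property_val = "Counter" then rulings ++ [pvMsgCounter]
      else if property_val = "Link" then rulings ++ [pvMsgLink]
      else if property_val = "Pendulum" then rulings ++ [pvMsgPend]
      else rulings
    if rulings = [] then [pvMsgGeneric1 card_name, pvMsgGeneric2 card_name] else rulings

-- ===== PORT B =====
-- (id, lowered keyword) pairs: Source B's `patterns`
def pvPatterns : List (String × List Char) :=
  [ ("once per turn", "once per turn".toList)
  , ("target", "target".toList)
  , ("destroy", "destroy".toList)
  , ("opt", "you can".toList)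
  , ("opt", "you may".toList)
  , ("negate", "negate".toList)
  , ("cannot be normal summoned/set", "cannot be normal summoned/set".toList)
  , ("Snake-eye", "snake-eye".toList)
  , ("Snake-Eyes", "snake-eyes".toList)
  , ("Crystal Beast", "crystal beast".toList)
  , ("Fiendsmith", "fiendsmith".toList)
  , ("Allure Queen", "allure queen".toList)
  , ("World Legacy", "world legacy".toList)
  , ("World Chalice", "world chalice".toList) ]

-- Source B's single pass: for i in range(len(low)): for pid, kw in patterns: if pid not in found and low.startswith(kw, i): found.add(pid)
-- (exact: for 0 ≤ i ≤ len(low), Python's low.startswith(kw, i) is startswith of the i-th suffix)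
def pvScan (low : List Char) : PySem.Set String :=
  (PySem.List.pyRange 0 low.length 1).foldl
    (fun f i =>
      pvPatterns.foldl
        (fun f p =>
          if (!(PySem.Set.contains f p.1)) && PySem.Chars.startswith (low.drop i.toNat) p.2 then
            PySem.Set.add f p.1
          else f) f)
    PySem.Set.empty

def pvCore (card_name : String) : List (String × String) :=
  [ ("once per turn", pvMsgOnce card_name)
  , ("target", pvMsgTarget card_name)
  , ("destroy", pvMsgDestroy card_name)
  , ("opt", pvMsgOptional card_name)
  , ("negate", pvMsgNegate card_name)
  , ("cannot be normal summoned/set", pvMsgSummon card_name) ]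

def pvPropMsgs : PySem.Dict String String :=
  PySem.Dict.mk [("Quick-Play", pvMsgQP), ("Counter", pvMsgCounter), ("Link", pvMsgLink), ("Pendulum", pvMsgPend)]

def generate_rulings_py_alt (card_name : String) (card_text : String) (property_val : String) : List String :=
  if card_text = "" then [pvMsgEmpty]
  else
    let low := PySem.Str.lower card_text
    let found := pvScan low.toList
    let rulings := ((pvCore card_name).filter (fun e => PySem.Set.contains found e.1)).map (·.2)
    let rulings : List String :=
      match pvArchetypes.find? (fun a => PySem.Set.contains found a) with
      | some a => rulings ++ [pvMsgArch a]
      | none => rulings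
    let rulings : List String :=
      match pvPropMsgs.get? property_val with
      | some m => rulings ++ [m]
      | none => rulings
    if rulings = [] then [pvMsgGeneric1 card_name, pvMsgGeneric2 card_name] else rulings

-- ===== PRECONDITION & SPEC =====
def Spec_generate_rulings_py (card_name : String) (card_text : String) (property_val : String) (out : List String) : Prop := out = generate_rulings_py_alt card_name card_text property_val
instance (card_name : String) (card_text : String) (property_val : String) (out : List String) : Decidable (Spec_generate_rulings_py card_name card_text property_val out) := by unfold Spec_generate_rulings_py; infer_instance

-- ===== CLAIM =====
def Claim_equal_generate_rulings_py : Prop := ∀ (card_name : String) (card_text : String) (property_val : String), Dom_generate_rulings_py card_name card_text property_val → Spec_generate_rulings_py card_name card_text property_val (generate_rulings_py card_name card_text property_val)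

-- ===== LEMMAS AND PROOFS =====

-- one step of the scan: the guarded add grows the membership by exactly a matched id
lemma pv_mem_step (low : List Char) (i : Int) (f : PySem.Set String) (p : String × List Char) (q : String) :
    (q ∈ (if (!(PySem.Set.contains f p.1)) && PySem.Chars.startswith (low.drop i.toNat) p.2 then
            PySem.Set.add f p.1
          else f)) ↔
      q ∈ f ∨ (p.1 = q ∧ PySem.Chars.startswith (low.drop i.toNat) p.2 = true) := by
  by_cases hs : PySem.Chars.startswith (low.drop i.toNat) p.2 = true
  · by_cases hc : p.1 ∈ f
    · have : PySem.Set.contains f p.1 = true := (PySem.Set.contains_iff f p.1).mpr hc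
      simp only [this, Bool.not_true, Bool.false_and, Bool.false_eq_true, if_false]
      constructor
      · exact Or.inl
      · rintro (h | ⟨rfl, _⟩)
        · exact h
        · exact hc
    · have hcf : PySem.Set.contains f p.1 = false := by
        rcases Bool.eq_false_or_eq_true (PySem.Set.contains f p.1) with h | h
        · exact absurd ((PySem.Set.contains_iff f p.1).mp h) hc
        · exact h
      simp only [hcf, Bool.not_false, Bool.true_and, hs, if_pos, PySem.Set.mem_add]
      constructor
      · rintro (h | h)
        · exact Or.inl h
        · exact Or.inr ⟨h.symm, trivial⟩
      · rintro (h | ⟨h, -⟩)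
        · exact Or.inl h
        · exact Or.inr h.symm
  · simp only [Bool.not_eq_true] at hs
    simp [hs]

-- membership after the inner per-position fold over the pattern list
lemma pv_mem_inner (low : List Char) (i : Int) (ps : List (String × List Char)) (f : PySem.Set String) (q : String) :
    q ∈ ps.foldl
        (fun f p =>
          if (!(PySem.Set.contains f p.1)) && PySem.Chars.startswith (low.drop i.toNat) p.2 then
            PySem.Set.add f p.1
          else f) f ↔
      q ∈ f ∨ ∃ p ∈ ps, p.1 = q ∧ PySem.Chars.startswith (low.drop i.toNat) p.2 = true := by
  induction ps generalizing f with
  | nil => simp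
  | cons p rest ih =>
      rw [List.foldl_cons, ih, pv_mem_step, List.exists_mem_cons_iff, or_assoc]

-- membership after the outer fold over the positions
lemma pv_mem_outer (low : List Char) (is : List Int) (f : PySem.Set String) (q : String) :
    q ∈ is.foldl
        (fun f i =>
          pvPatterns.foldl
            (fun f p =>
              if (!(PySem.Set.contains f p.1)) && PySem.Chars.startswith (low.drop i.toNat) p.2 then
                PySem.Set.add f p.1
              else f) f) f ↔
      q ∈ f ∨ ∃ i ∈ is, ∃ p ∈ pvPatterns, p.1 = q ∧ PySem.Chars.startswith (low.drop i.toNat) p.2 = true := by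
  induction is generalizing f with
  | nil => simp
  | cons i rest ih =>
      rw [List.foldl_cons, ih, pv_mem_inner, List.exists_mem_cons_iff, or_assoc]

-- a nonempty keyword starts at some scanned position iff it is a substring
lemma pv_exists_start_iff (low kw : List Char) (hk : kw ≠ []) :
    (∃ i ∈ PySem.List.pyRange 0 low.length 1, PySem.Chars.startswith (low.drop i.toNat) kw = true) ↔
      PySem.Chars.isIn kw low = true := by
  rw [← PySem.Chars.exists_prefix_drop_iff_isIn]
  constructor
  · rintro ⟨i, hi, h⟩
    exact ⟨i.toNat, (PySem.Chars.startswith_iff _ _).mp h⟩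
  · rintro ⟨j, h⟩
    have hjlt : j < low.length := by
      by_contra hge
      push_neg at hge
      rw [List.drop_eq_nil_of_le hge] at h
      exact hk (List.prefix_nil.mp h)
    refine ⟨(j : Int), ?_, ?_⟩
    · rw [PySem.List.mem_pyRange_one]
      constructor
      · exact_mod_cast Nat.zero_le j
      · exact_mod_cast hjlt
    · rw [PySem.Chars.startswith_iff]
      simpa using h

-- the scan's set contains q iff some pattern with id q occurs in the text
lemma pv_mem_pvScan (low : List Char) (q : String) :
    q ∈ pvScan low ↔ ∃ p ∈ pvPatterns, p.1 = q ∧ PySem.Chars.isIn p.2 low = true := by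
  unfold pvScan
  rw [pv_mem_outer]
  have hne : ∀ p ∈ pvPatterns, p.2 ≠ [] := by decide
  constructor
  · rintro (h | ⟨i, hi, p, hp, h1, h2⟩)
    · exact absurd h (by simp [PySem.Set.empty])
    · exact ⟨p, hp, h1, (pv_exists_start_iff low p.2 (hne p hp)).mp ⟨i, hi, h2⟩⟩
  · rintro ⟨p, hp, h1, h2⟩
    obtain ⟨i, hi, hs⟩ := (pv_exists_start_iff low p.2 (hne p hp)).mpr h2
    exact Or.inr ⟨i, hi, p, hp, h1, hs⟩

-- Bool-level readings of the scan for every id the emission phase asks about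
lemma pv_contains_once (L : List Char) : PySem.Set.contains (pvScan L) "once per turn" = PySem.Chars.isIn "once per turn".toList L := by
  rw [Bool.eq_iff_iff, PySem.Set.contains_iff, pv_mem_pvScan]; simp [pvPatterns]
lemma pv_contains_target (L : List Char) : PySem.Set.contains (pvScan L) "target" = PySem.Chars.isIn "target".toList L := by
  rw [Bool.eq_iff_iff, PySem.Set.contains_iff, pv_mem_pvScan]; simp [pvPatterns]
lemma pv_contains_destroy (L : List Char) : PySem.Set.contains (pvScan L) "destroy" = PySem.Chars.isIn "destroy".toList L := by
  rw [Bool.eq_iff_iff, PySem.Set.contains_iff, pv_mem_pvScan]; simp [pvPatterns]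
lemma pv_contains_opt (L : List Char) : PySem.Set.contains (pvScan L) "opt" = (PySem.Chars.isIn "you can".toList L || PySem.Chars.isIn "you may".toList L) := by
  rw [Bool.eq_iff_iff, PySem.Set.contains_iff, pv_mem_pvScan, Bool.or_eq_true]; simp [pvPatterns]
lemma pv_contains_negate (L : List Char) : PySem.Set.contains (pvScan L) "negate" = PySem.Chars.isIn "negate".toList L := by
  rw [Bool.eq_iff_iff, PySem.Set.contains_iff, pv_mem_pvScan]; simp [pvPatterns]
lemma pv_contains_summon (L : List Char) : PySem.Set.contains (pvScan L) "cannot be normal summoned/set" = PySem.Chars.isIn "cannot be normal summoned/set".toList L := by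
  rw [Bool.eq_iff_iff, PySem.Set.contains_iff, pv_mem_pvScan]; simp [pvPatterns]

-- each archetype id is in the scan's set iff its lowered name is a substring (A's test)
lemma pv_contains_arch (L : List Char) :
    ∀ a ∈ pvArchetypes, PySem.Set.contains (pvScan L) a = PySem.Chars.isIn (PySem.Chars.lower a.toList) L := by
  have h1 : PySem.Chars.lower "Snake-eye".toList = "snake-eye".toList := by decide
  have h2 : PySem.Chars.lower "Snake-Eyes".toList = "snake-eyes".toList := by decide
  have h3 : PySem.Chars.lower "Crystal Beast".toList = "crystal beast".toList := by decide
  have h4 : PySem.Chars.lower "Fiendsmith".toList = "fiendsmith".toList := by decide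
  have h5 : PySem.Chars.lower "Allure Queen".toList = "allure queen".toList := by decide
  have h6 : PySem.Chars.lower "World Legacy".toList = "world legacy".toList := by decide
  have h7 : PySem.Chars.lower "World Chalice".toList = "world chalice".toList := by decide
  intro a ha
  fin_cases ha <;>
    simp only [h1, h2, h3, h4, h5, h6, h7] <;>
    (rw [Bool.eq_iff_iff, PySem.Set.contains_iff, pv_mem_pvScan]; simp [pvPatterns])

-- find? only depends on the predicate's values on the list
lemma pv_find?_congr {α : Type} (l : List α) (p q : α → Bool) (h : ∀ a ∈ l, p a = q a) :
    l.find? p = l.find? q := by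
  induction l with
  | nil => rfl
  | cons a rest ih =>
      simp only [List.find?_cons, h a (List.mem_cons_self)]
      cases q a
      · exact ih fun a ha => h a (List.mem_cons_of_mem _ ha)
      · rfl

-- A's break-loop equals find? over the same predicate
lemma pv_arch_eq (low : String) (r : List String) (as_ : List String) :
    pvArchLoopA low r as_ =
      (match as_.find? (fun a => PySem.Str.isIn (PySem.Str.lower a) low) with
       | some a => r ++ [pvMsgArch a]
       | none => r) := by
  induction as_ with
  | nil => rfl
  | cons a rest ih =>
      cases h : PySem.Str.isIn (PySem.Str.lower a) low with
      | true => simp only [pvArchLoopA, List.find?_cons, h]; simp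
      | false => simp only [pvArchLoopA, List.find?_cons, h, Bool.false_eq_true, if_false]; exact ih

-- A's property if-chain equals B's dict lookup
set_option maxRecDepth 4000 in
lemma pv_prop_eq (pv : String) (r : List String) :
    (if pv = "Quick-Play" then r ++ [pvMsgQP]
     else if pv = "Counter" then r ++ [pvMsgCounter]
     else if pv = "Link" then r ++ [pvMsgLink]
     else if pv = "Pendulum" then r ++ [pvMsgPend]
     else r) =
    (match pvPropMsgs.get? pv with
     | some m => r ++ [m]
     | none => r) := by
  simp only [pvPropMsgs, PySem.Dict.get?_mk_cons]
  by_cases h1 : pv = "Quick-Play"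
  · subst h1; simp
  rw [if_neg h1]
  simp only [beq_eq_false_iff_ne.mpr (fun h => h1 h.symm), Bool.false_eq_true, if_false]
  by_cases h2 : pv = "Counter"
  · subst h2; simp
  rw [if_neg h2]
  simp only [beq_eq_false_iff_ne.mpr (fun h => h2 h.symm), Bool.false_eq_true, if_false]
  by_cases h3 : pv = "Link"
  · subst h3; simp
  rw [if_neg h3]
  simp only [beq_eq_false_iff_ne.mpr (fun h => h3 h.symm), Bool.false_eq_true, if_false]
  by_cases h4 : pv = "Pendulum"
  · subst h4; simp
  rw [if_neg h4]
  simp only [beq_eq_false_iff_ne.mpr (fun h => h4 h.symm), Bool.false_eq_true, if_false]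
  simp [PySem.Dict.get?]

-- B's filtered core table equals A's six sequential conditional appends from []
lemma pv_filter_eq (card_name : String) (L : List Char) :
    (((pvCore card_name).filter (fun e => PySem.Set.contains (pvScan L) e.1)).map (·.2)) =
    (let r : List String := []
     let r := if PySem.Chars.isIn "once per turn".toList L = true then r ++ [pvMsgOnce card_name] else r
     let r := if PySem.Chars.isIn "target".toList L = true then r ++ [pvMsgTarget card_name] else r
     let r := if PySem.Chars.isIn "destroy".toList L = true then r ++ [pvMsgDestroy card_name] else r
     let r := if (PySem.Chars.isIn "you can".toList L || PySem.Chars.isIn "you may".toList L) = true then r ++ [pvMsgOptional card_name] else r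
     let r := if PySem.Chars.isIn "negate".toList L = true then r ++ [pvMsgNegate card_name] else r
     if PySem.Chars.isIn "cannot be normal summoned/set".toList L = true then r ++ [pvMsgSummon card_name] else r) := by
  simp only [pvCore, List.filter_cons, List.filter_nil,
    pv_contains_once, pv_contains_target, pv_contains_destroy, pv_contains_opt,
    pv_contains_negate, pv_contains_summon]
  by_cases h1 : PySem.Chars.isIn "once per turn".toList L = true <;>
  by_cases h2 : PySem.Chars.isIn "target".toList L = true <;>
  by_cases h3 : PySem.Chars.isIn "destroy".toList L = true <;>
  by_cases h4 : (PySem.Chars.isIn "you can".toList L || PySem.Chars.isIn "you may".toList L) = true <;>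
  by_cases h5 : PySem.Chars.isIn "negate".toList L = true <;>
  by_cases h6 : PySem.Chars.isIn "cannot be normal summoned/set".toList L = true <;>
    simp_all

-- ===== VERDICT =====
theorem generate_rulings_py_spec : Claim_equal_generate_rulings_py := by
  intro card_name card_text property_val _
  unfold Spec_generate_rulings_py generate_rulings_py generate_rulings_py_alt
  by_cases hE : card_text = ""
  · simp [hE]
  · simp only [if_neg hE]
    have harch : pvArchetypes.find? (fun a => PySem.Set.contains (pvScan (PySem.Str.lower card_text).toList) a) =
        pvArchetypes.find? (fun a => PySem.Str.isIn (PySem.Str.lower a) (PySem.Str.lower card_text)) := by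
      apply pv_find?_congr
      intro a ha
      rw [pv_contains_arch _ a ha, PySem.Str.isIn_eq]
      simp only [PySem.Str.toList_lower]
    rw [pv_arch_eq, harch, pv_filter_eq, pv_prop_eq]
    simp only [PySem.Str.isIn_eq, List.any_cons, List.any_nil, Bool.or_false]
    rfl
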